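-- pv_equiv track=rewrite | github.com/taylor-swift-13/LLM4LoopInvGen | invGen.py | append_inner_annotations
-- ===== SOURCE A (Python) =====
-- def append_inner_annotations(annotations):
--     updated_code = []
--     invariant_annotation = f" PLACE_HOLDER_FOR_LOOP "
--     found_first_annotation = False
--
--     for line in annotations.splitlines():
--         if not found_first_annotation and '/*@' in line:
--         # Append the current line
--             updated_code.append(line)
--         # Insert the invariant annotations below the first occurrence of /*@
--             updated_code.append(f"          {invariant_annotation}")
--             found_first_annotation = True
--         else:
--         # Keep other lines as they are
--             updated_code.append(line)
--
--    # Join the list back into a single string and return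
--     return "\n".join(updated_code)
-- ===== SOURCE B (Python) =====
-- def append_inner_annotations(annotations):
--     lines = annotations.splitlines()
--     i = next((k for k, line in enumerate(lines) if '/*@' in line), None)
--     if i is not None:
--         lines = lines[:i+1] + ["           PLACE_HOLDER_FOR_LOOP "] + lines[i+1:]
--     return "\n".join(lines)
-- ===== Notes on version B (the rewrite author's own statement) =====
-- stated objective: idiomatic
-- what changed: Replaces the flag-carrying per-line branch loop with locate-then-splice: find the index of the first line containing '/*@' with next(enumerate(...)), then insert the placeholder by list slicing.
import Mathlib
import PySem

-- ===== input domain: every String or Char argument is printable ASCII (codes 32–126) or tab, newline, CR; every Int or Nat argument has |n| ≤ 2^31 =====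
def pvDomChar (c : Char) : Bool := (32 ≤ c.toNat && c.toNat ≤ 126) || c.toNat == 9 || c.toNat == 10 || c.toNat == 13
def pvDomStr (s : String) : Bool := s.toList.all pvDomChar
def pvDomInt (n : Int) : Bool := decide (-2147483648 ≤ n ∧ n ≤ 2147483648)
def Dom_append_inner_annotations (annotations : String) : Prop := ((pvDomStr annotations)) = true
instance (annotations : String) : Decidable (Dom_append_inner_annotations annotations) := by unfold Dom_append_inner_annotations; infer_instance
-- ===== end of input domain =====

-- B restructures A's flag-carrying scan into locate-then-splice (find first line with '/*@', insert by slicing); same behaviour, idiomatic decomposition.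

-- ===== PORT A =====
-- A's for-loop over splitlines carrying the found_first_annotation flag, line by line
def pvALoop : List String → Bool → List String
  | [], _ => []
  | l :: ls, found =>
      if !found && PySem.Str.isIn "/*@" l then
        l :: "           PLACE_HOLDER_FOR_LOOP " :: pvALoop ls true
      else
        l :: pvALoop ls found

def append_inner_annotations (annotations : String) : String :=
  PySem.Str.join "\n" (pvALoop (PySem.Str.splitlines annotations) false)

-- ===== PORT B =====
def append_inner_annotations_alt (annotations : String) : String :=
  let lines := PySem.Str.splitlines annotations
  let lines' :=
    match lines.findIdx? (fun l => PySem.Str.isIn "/*@" l) with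
    | some i => lines.take (i + 1) ++ ["           PLACE_HOLDER_FOR_LOOP "] ++ lines.drop (i + 1)
    | none => lines
  PySem.Str.join "\n" lines'

-- ===== PRECONDITION & SPEC =====
def Spec_append_inner_annotations (annotations : String) (out : String) : Prop := out = append_inner_annotations_alt annotations
instance (annotations : String) (out : String) : Decidable (Spec_append_inner_annotations annotations out) := by unfold Spec_append_inner_annotations; infer_instance

-- ===== CLAIM (what is proved, stated in full; the proofs are below) =====
def Claim_equal_append_inner_annotations : Prop := ∀ (annotations : String), Dom_append_inner_annotations annotations → Spec_append_inner_annotations annotations (append_inner_annotations annotations)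

-- ===== LEMMAS AND PROOFS =====
theorem pvALoop_true (ls : List String) : pvALoop ls true = ls := by
  induction ls with
  | nil => rfl
  | cons l ls ih => simp [pvALoop, ih]

theorem pvALoop_eq_splice (ls : List String) :
    pvALoop ls false =
      match ls.findIdx? (fun l => PySem.Str.isIn "/*@" l) with
      | some i => ls.take (i + 1) ++ ["           PLACE_HOLDER_FOR_LOOP "] ++ ls.drop (i + 1)
      | none => ls := by
  induction ls with
  | nil => rfl
  | cons l ls ih =>
    by_cases h : PySem.Str.isIn "/*@" l = true
    all_goals simp only [PySem.Str.isIn_eq, show ("/*@".toList)=['/','*','@'] from rfl] at h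
    · simp [pvALoop, h, List.findIdx?_cons, pvALoop_true]
    · simp only [pvALoop, PySem.Str.isIn_eq, show ("/*@".toList)=['/','*','@'] from rfl,
        Bool.not_false, Bool.true_and]
      rw [if_neg h, ih]
      cases hf : ls.findIdx? (fun l => PySem.Str.isIn "/*@" l) with
      | none => simp only [PySem.Str.isIn_eq, show ("/*@".toList)=['/','*','@'] from rfl] at hf; simp [List.findIdx?_cons, h, hf]
      | some i => simp only [PySem.Str.isIn_eq, show ("/*@".toList)=['/','*','@'] from rfl] at hf
                  simp [List.findIdx?_cons, h, hf, List.take_succ_cons, List.drop_succ_cons]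

-- ===== VERDICT (by name: the statement is the Claim_ definition above) =====
theorem append_inner_annotations_spec : Claim_equal_append_inner_annotations := by
  intro s _
  unfold Spec_append_inner_annotations append_inner_annotations append_inner_annotations_alt
  rw [pvALoop_eq_splice]
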